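-- pv_equiv track=rewrite | github.com/danjglick/surpriseme | backend/get_albums.py | _remove_tables
-- ===== SOURCE A (Python) =====
-- def _remove_tables(text: str) -> str:
--     result = []
--     depth = 0
--     i = 0
--     while i < len(text):
--         if text[i:i+2] == '{|':
--             depth += 1
--             i += 2
--         elif text[i:i+2] == '|}':
--             depth = max(0, depth - 1)
--             i += 2
--         elif depth == 0:
--             result.append(text[i])
--             i += 1
--         else:
--             i += 1
--     return ''.join(result)
-- ===== SOURCE B (Python) =====
-- def _remove_tables(text: str) -> str:
--     pieces = []
--     depth = 0
--     cur = 0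
--     while True:
--         a = text.find('{|', cur)
--         b = text.find('|}', cur)
--         if a == -1 and b == -1:
--             break
--         if b == -1 or (a != -1 and a < b):
--             pos, is_open = a, True
--         else:
--             pos, is_open = b, False
--         if depth == 0:
--             pieces.append(text[cur:pos])
--         depth = depth + 1 if is_open else max(0, depth - 1)
--         cur = pos + 2
--     if depth == 0:
--         pieces.append(text[cur:])
--     return ''.join(pieces)
-- ===== Notes on version B (the rewrite author's own statement) =====
-- stated objective: faster
-- what changed: Replaced A's per-character cursor scan with a segment loop that uses str.find to jump directly from table token to token, slicing whole untouched segments into the output instead of appending single characters.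
import Mathlib
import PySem

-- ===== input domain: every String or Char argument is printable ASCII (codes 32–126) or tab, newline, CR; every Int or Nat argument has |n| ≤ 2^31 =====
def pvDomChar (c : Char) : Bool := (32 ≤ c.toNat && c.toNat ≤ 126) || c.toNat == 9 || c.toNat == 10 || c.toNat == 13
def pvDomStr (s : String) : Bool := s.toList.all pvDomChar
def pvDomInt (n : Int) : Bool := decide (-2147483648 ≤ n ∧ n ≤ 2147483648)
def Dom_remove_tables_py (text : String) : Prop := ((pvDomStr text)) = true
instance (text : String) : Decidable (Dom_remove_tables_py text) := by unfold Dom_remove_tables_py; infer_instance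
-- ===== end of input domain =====

-- B replaces A's per-character scan by a segment loop driven by str.find (jump from
-- token to token, emit whole slices); measurably faster by a constant factor in Python.

-- ===== PORT A =====
-- A's while loop over the cursor i, transliterated as recursion over the remaining
-- characters (text[i:i+2] == '{|' is the two-head pattern; max(0, depth-1) is Nat sub).
def removeTablesA : List Char → Nat → List Char
  | [], _ => []
  | [c], depth => if depth = 0 then [c] else []
  | c1 :: c2 :: rest, depth =>
      if c1 = '{' ∧ c2 = '|' then removeTablesA rest (depth + 1)
      else if c1 = '|' ∧ c2 = '}' then removeTablesA rest (depth - 1)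
      else if depth = 0 then c1 :: removeTablesA (c2 :: rest) depth
      else removeTablesA (c2 :: rest) depth

def remove_tables_py (text : String) : String := String.ofList (removeTablesA text.toList 0)

-- ===== PORT B =====
-- Source B's `while True` loop with cursor cur and two str.find calls per iteration;
-- the post-loop trailing append is the base case.  text[cur:pos] for 0 ≤ cur ≤ pos
-- is (l.drop cur).take (pos - cur); the fuel argument only certifies termination
-- (the top-level call's fuel is proved sufficient by the equivalence lemmas below).
def removeTablesBGo : Nat → List Char → Nat → Nat → List (List Char)
  | 0, _, _, _ => []  -- fuel guard only; the top-level call supplies enough fuel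
  | fuel + 1, l, depth, cur =>
    let a := PySem.Chars.findFrom l ['{', '|'] (cur : Int)
    let b := PySem.Chars.findFrom l ['|', '}'] (cur : Int)
    if a = -1 ∧ b = -1 then
      (if depth = 0 then [l.drop cur] else [])
    else
      let isOpen : Bool := decide (b = -1 ∨ (a ≠ -1 ∧ a < b))
      let pos := (if isOpen then a else b).toNat
      (if depth = 0 then [(l.drop cur).take (pos - cur)] else []) ++
        removeTablesBGo fuel l (if isOpen then depth + 1 else depth - 1) (pos + 2)

def remove_tables_py_alt (text : String) : String :=
  String.ofList (removeTablesBGo (text.toList.length + 1) text.toList 0 0).flatten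

-- ===== PRECONDITION & SPEC =====
def Spec_remove_tables_py (text : String) (out : String) : Prop := out = remove_tables_py_alt text
instance (text : String) (out : String) : Decidable (Spec_remove_tables_py text out) := by unfold Spec_remove_tables_py; infer_instance

-- ===== CLAIM (what is proved, stated in full; the proofs are below) =====
def Claim_equal_remove_tables_py : Prop := ∀ (text : String), Dom_remove_tables_py text → Spec_remove_tables_py text (remove_tables_py text)

-- ===== LEMMAS AND PROOFS =====

-- a prefix of some drop of s is an infix of s
theorem pv_prefix_drop_infix {t s : List Char} {j : Nat} (h : t <+: s.drop j) : t <:+: s :=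
  h.isInfix.trans (List.drop_suffix j s).isInfix

-- on a token-free tail, A keeps everything (depth 0) or drops everything (depth > 0)
theorem pv_noTok (s : List Char) (d : Nat)
    (h1 : ¬ ['{', '|'] <:+: s) (h2 : ¬ ['|', '}'] <:+: s) :
    removeTablesA s d = if d = 0 then s else [] := by
  fun_induction removeTablesA s d with
  | case1 => simp
  | case2 => simp
  | case3 c d hd => simp [hd]
  | case4 c1 c2 rest depth htok ih =>
      exact absurd (List.IsPrefix.isInfix (by simp [htok.1, htok.2])) h1
  | case5 c1 c2 rest depth _ htok ih =>
      exact absurd (List.IsPrefix.isInfix (by simp [htok.1, htok.2])) h2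
  | case6 c1 c2 rest _ _ ih =>
      rw [ih (fun h => h1 (h.trans (List.suffix_cons c1 (c2::rest)).isInfix))
            (fun h => h2 (h.trans (List.suffix_cons c1 (c2::rest)).isInfix))]
      simp
  | case7 c1 c2 rest depth _ _ hd ih =>
      rw [ih (fun h => h1 (h.trans (List.suffix_cons c1 (c2::rest)).isInfix))
            (fun h => h2 (h.trans (List.suffix_cons c1 (c2::rest)).isInfix))]
      simp [hd]

-- crossing a token-free segment of length m
theorem pv_seg (m : Nat) (s : List Char) (d : Nat)
    (h : ∀ j < m, ¬ ['{', '|'] <+: s.drop j ∧ ¬ ['|', '}'] <+: s.drop j) :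
    removeTablesA s d = (if d = 0 then s.take m else []) ++ removeTablesA (s.drop m) d := by
  induction m generalizing s with
  | zero => simp
  | succ m ih =>
      match s with
      | [] => simp [removeTablesA]
      | [c] =>
          rw [removeTablesA]
          simp only [List.drop_nil, List.drop_succ_cons]
          split <;> simp [removeTablesA]
      | c1 :: c2 :: rest =>
          have h0 := h 0 (by omega)
          simp only [List.drop_zero, List.cons_prefix_cons] at h0
          rw [removeTablesA, if_neg, if_neg]
          · have hrec := ih (c2 :: rest) (fun j hj => by
              have := h (j+1) (by omega)
              simpa using this)
            by_cases hd : d = 0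
            · subst hd; rw [if_pos rfl] at hrec; simp [hrec]
            · simp only [if_neg hd] at hrec ⊢; simp [hrec]
          · rintro ⟨e1, e2⟩; exact h0.2 ⟨e1.symm, e2.symm, by simp⟩
          · rintro ⟨e1, e2⟩; exact h0.1 ⟨e1.symm, e2.symm, by simp⟩

-- the token found at pos eats two characters and bumps the depth
theorem pv_tok_step (tok rest : List Char) (d : Nat)
    (h : tok = ['{', '|'] ∨ tok = ['|', '}']) :
    removeTablesA (tok ++ rest) d =
      removeTablesA rest (if tok = ['{', '|'] then d + 1 else d - 1) := by
  rcases h with h | h <;> subst h <;> simp [removeTablesA]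

-- crossing the token-free stretch up to pos and consuming the token found there

-- crossing the token-free stretch up to pos and consuming the token found there
theorem pv_found (l : List Char) (cur pos depth : Nat) (tok : List Char)
    (htok : tok = ['{', '|'] ∨ tok = ['|', '}'])
    (hcur : cur ≤ pos) (hpre : tok <+: l.drop pos)
    (hmin : ∀ j, cur ≤ j → j < pos → ¬ ['{', '|'] <+: l.drop j ∧ ¬ ['|', '}'] <+: l.drop j) :
    removeTablesA (l.drop cur) depth =
      (if depth = 0 then (l.drop cur).take (pos - cur) else []) ++
        removeTablesA (l.drop (pos + 2)) (if tok = ['{', '|'] then depth + 1 else depth - 1) := by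
  have hseg := pv_seg (pos - cur) (l.drop cur) depth (by
    intro j hj
    rw [List.drop_drop]
    exact hmin (cur + j) (by omega) (by omega))
  have hdd : (l.drop cur).drop (pos - cur) = l.drop pos := by
    rw [List.drop_drop]; congr 1; omega
  have hsplit : l.drop pos = tok ++ l.drop (pos + 2) := by
    obtain ⟨t, ht⟩ := hpre
    have h2 : l.drop (pos + 2) = t := by
      have hdt := congrArg (List.drop 2) ht
      rw [List.drop_drop] at hdt
      rcases htok with h | h <;> subst h <;> simpa using hdt.symm
    rw [← ht, h2]
  rw [hseg, hdd, hsplit, pv_tok_step tok _ depth htok]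

-- the loops agree: A scanned from cur equals the flattened pieces B emits from cur
theorem pv_main : ∀ (n : Nat) (l : List Char) (cur depth : Nat),
    l.length - cur < n → cur ≤ l.length →
    removeTablesA (l.drop cur) depth = (removeTablesBGo n l depth cur).flatten := by
  intro n
  induction n with
  | zero => intro l cur depth hn; omega
  | succ n ih =>
    intro l cur depth hn hcur
    rw [removeTablesBGo]
    set fa := PySem.Chars.findFrom l ['{', '|'] (cur : Int) with hfa
    set fb := PySem.Chars.findFrom l ['|', '}'] (cur : Int) with hfb
    by_cases hab : fa = -1 ∧ fb = -1
    · rw [if_pos hab]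
      have h1 : ¬ ['{', '|'] <:+: l.drop cur :=
        (PySem.Chars.findFrom_natCast_eq_neg_one_iff l _ cur hcur).mp hab.1
      have h2 : ¬ ['|', '}'] <:+: l.drop cur :=
        (PySem.Chars.findFrom_natCast_eq_neg_one_iff l _ cur hcur).mp hab.2
      rw [pv_noTok _ depth h1 h2]
      split <;> simp
    · rw [if_neg hab]
      by_cases hc : fb = -1 ∨ (fa ≠ -1 ∧ fa < fb)
      · -- the open token '{|' comes first
        have ha : fa ≠ -1 := by
          rcases hc with h | h
          · exact fun e => hab ⟨e, h⟩
          · exact h.1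
        obtain ⟨hge, hpre, hminA⟩ :=
          PySem.Chars.findFrom_natCast_spec l ['{', '|'] cur hcur ha
        have hcurpos : cur ≤ fa.toNat := by omega
        have hpos2 : fa.toNat + 2 ≤ l.length := by
          have hl := hpre.length_le
          simp at hl; omega
        have hminB : ∀ j, cur ≤ j → j < fa.toNat → ¬ ['|', '}'] <+: l.drop j := by
          intro j h1 h2 hp
          rcases hc with hb1 | ⟨_, hlt⟩
          · have : l.drop j = (l.drop cur).drop (j - cur) := by
              rw [List.drop_drop]; congr 1; omega
            rw [this] at hp
            exact (PySem.Chars.findFrom_natCast_eq_neg_one_iff l _ cur hcur).mp hb1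
              (pv_prefix_drop_infix hp)
          · have hb : fb ≠ -1 := by
              intro e; rw [e] at hlt; omega
            obtain ⟨hgeb, _, hminb⟩ :=
              PySem.Chars.findFrom_natCast_spec l ['|', '}'] cur hcur hb
            exact hminb j h1 (by omega) hp
        have key := pv_found l cur fa.toNat depth ['{', '|'] (Or.inl rfl) hcurpos hpre
          (fun j hj1 hj2 => ⟨hminA j hj1 hj2, hminB j hj1 hj2⟩)
        simp only [reduceIte] at key
        have hco : decide (fb = -1 ∨ (fa ≠ -1 ∧ fa < fb)) = true := decide_eq_true hc
        simp only [hco, if_true]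
        rw [key, ih l (fa.toNat + 2) (depth + 1) (by omega) (by omega)]
        by_cases hd : depth = 0 <;> simp [hd]
      · -- the close token '|}' comes first
        have hb : fb ≠ -1 := fun e => hc (Or.inl e)
        obtain ⟨hge, hpre, hminBtok⟩ :=
          PySem.Chars.findFrom_natCast_spec l ['|', '}'] cur hcur hb
        have hcurpos : cur ≤ fb.toNat := by omega
        have hpos2 : fb.toNat + 2 ≤ l.length := by
          have hl := hpre.length_le
          simp at hl; omega
        have hminA : ∀ j, cur ≤ j → j < fb.toNat → ¬ ['{', '|'] <+: l.drop j := by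
          intro j h1 h2 hp
          push_neg at hc
          rcases eq_or_ne fa (-1) with e | e
          · have : l.drop j = (l.drop cur).drop (j - cur) := by
              rw [List.drop_drop]; congr 1; omega
            rw [this] at hp
            exact (PySem.Chars.findFrom_natCast_eq_neg_one_iff l _ cur hcur).mp e
              (pv_prefix_drop_infix hp)
          · have hle : fb ≤ fa := by
              have := hc.2 e
              omega
            obtain ⟨hgea, _, hmina⟩ :=
              PySem.Chars.findFrom_natCast_spec l ['{', '|'] cur hcur e
            exact hmina j h1 (by omega) hp
        have key := pv_found l cur fb.toNat depth ['|', '}'] (Or.inr rfl) hcurpos hpre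
          (fun j hj1 hj2 => ⟨hminA j hj1 hj2, hminBtok j hj1 hj2⟩)
        rw [if_neg (by decide : ¬(['|', '}'] = ['{', '|']))] at key
        have hco : decide (fb = -1 ∨ (fa ≠ -1 ∧ fa < fb)) = false := decide_eq_false hc
        simp only [hco, if_false, Bool.false_eq_true]
        rw [key, ih l (fb.toNat + 2) (depth - 1) (by omega) (by omega)]
        by_cases hd : depth = 0 <;> simp [hd]

-- ===== VERDICT (by name: the statement is the Claim_ definition above) =====
theorem remove_tables_py_spec : Claim_equal_remove_tables_py := by
  intro text _
  unfold Spec_remove_tables_py remove_tables_py remove_tables_py_alt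
  have := pv_main (text.toList.length + 1) text.toList 0 0 (by omega) (by omega)
  rw [List.drop_zero] at this
  exact congrArg String.ofList this
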